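-- pv_equiv track=rewrite | github.com/chngr/kakko | RamseyNumber/classification/cartan.py | get_tuples
-- ===== SOURCE A (Python) =====
-- def get_tuples(max_val, list_len):
--     test_list = []
--     if list_len > 1:
--         return tuple_helper(get_tuples(max_val,list_len-1),max_val)
--     else:
--         for i in range(max_val+1):
--             test_list.append([i])
--         return test_list
--
-- def tuple_helper(old_list, max_val):
--     new_list = []
--     for i in range(len(old_list)):
--         cur_tuple = old_list[i]
--         for j in range(max_val+1):
--             new_cur_tuple = []
--             new_cur_tuple = cur_tuple + [j]
--             new_list.append(new_cur_tuple)
--     return new_list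
-- ===== SOURCE B (Python) =====
-- def get_tuples(max_val, list_len):
--     result = [[i] for i in range(max_val + 1)]
--     for _ in range(list_len - 1):
--         result = [t + [j] for t in result for j in range(max_val + 1)]
--     return result
-- ===== Notes on version B (the rewrite author's own statement) =====
-- stated objective: simpler
-- what changed: Replaced A's linear recursion plus index-loop helper with a single iterative loop that rebuilds the result list_len-1 times with one nested comprehension.
-- outside the precondition, e.g. on get_tuples(-1, 950): A returns [], B returns []
import Mathlib
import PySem

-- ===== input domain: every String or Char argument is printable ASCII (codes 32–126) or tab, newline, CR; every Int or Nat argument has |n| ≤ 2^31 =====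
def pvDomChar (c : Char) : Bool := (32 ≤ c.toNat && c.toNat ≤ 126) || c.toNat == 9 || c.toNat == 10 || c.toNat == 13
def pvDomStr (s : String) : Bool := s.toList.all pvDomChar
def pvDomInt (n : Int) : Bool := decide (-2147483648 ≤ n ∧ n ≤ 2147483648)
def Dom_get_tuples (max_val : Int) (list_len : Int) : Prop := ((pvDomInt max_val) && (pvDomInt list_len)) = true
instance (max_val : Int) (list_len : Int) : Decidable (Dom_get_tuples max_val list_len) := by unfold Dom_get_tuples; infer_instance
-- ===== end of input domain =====

-- B replaces A's recursion-plus-helper with one iterative loop over list_len-1 rebuild steps (simpler decomposition; same cost).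

-- ===== PORT A =====
-- port of tuple_helper: index loop over old_list, inner loop appending cur_tuple + [j]
def tuple_helper (old_list : List (List Int)) (max_val : Int) : List (List Int) :=
  (PySem.List.pyRange 0 (old_list.length : Int) 1).foldl
    (fun new_list i =>
      (PySem.List.pyRange 0 (max_val + 1) 1).foldl
        (fun nl j => nl ++ [PySem.List.pyGetD old_list i [] ++ [j]]) new_list)
    []

def get_tuples (max_val : Int) (list_len : Int) : List (List Int) :=
  if 1 < list_len then
    tuple_helper (get_tuples max_val (list_len - 1)) max_val
  else
    (PySem.List.pyRange 0 (max_val + 1) 1).foldl (fun test_list i => test_list ++ [[i]]) []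
termination_by list_len.toNat
decreasing_by omega

-- ===== PORT B =====
def get_tuples_alt (max_val : Int) (list_len : Int) : List (List Int) :=
  (PySem.List.pyRange 0 (list_len - 1) 1).foldl
    (fun result _ =>
      result.flatMap (fun t => (PySem.List.pyRange 0 (max_val + 1) 1).map (fun j => t ++ [j])))
    ((PySem.List.pyRange 0 (max_val + 1) 1).map (fun i => [i]))

-- ===== PRECONDITION & SPEC =====
-- Pre_ excludes inputs with list_len > 900, where A's recursion of depth list_len-1 exceeds (or, with a margin for
-- caller stack frames, may exceed) CPython's recursion limit and raises RecursionError; the margin also excludes a few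
-- large-list_len inputs with negative max_val on which A still returns [] (B returns [] there too).
def Pre_get_tuples (max_val : Int) (list_len : Int) : Prop := list_len ≤ 900
instance (max_val : Int) (list_len : Int) : Decidable (Pre_get_tuples max_val list_len) := by unfold Pre_get_tuples; infer_instance
def pvWitness_get_tuples : Int × Int := (2, 3)

def Spec_get_tuples (max_val : Int) (list_len : Int) (out : List (List Int)) : Prop := out = get_tuples_alt max_val list_len
instance (max_val : Int) (list_len : Int) (out : List (List Int)) : Decidable (Spec_get_tuples max_val list_len out) := by unfold Spec_get_tuples; infer_instance

-- ===== CLAIM (what is proved, stated in full; the proofs are below) =====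
def Claim_equal_get_tuples : Prop := ∀ (max_val : Int) (list_len : Int), Dom_get_tuples max_val list_len → Pre_get_tuples max_val list_len → Spec_get_tuples max_val list_len (get_tuples max_val list_len)

-- ===== LEMMAS AND PROOFS =====

-- one step of B's loop
def pvStep (max_val : Int) (result : List (List Int)) : List (List Int) :=
  result.flatMap (fun t => (PySem.List.pyRange 0 (max_val + 1) 1).map (fun j => t ++ [j]))

lemma tuple_helper_eq_step (xs : List (List Int)) (max_val : Int) :
    tuple_helper xs max_val = pvStep max_val xs := by
  unfold tuple_helper pvStep
  rw [PySem.List.foldl_pyRange_zero_pyGetD' xs []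
      (fun (nl : List (List Int)) (cur : List Int) =>
        (PySem.List.pyRange 0 (max_val + 1) 1).foldl (fun nl j => nl ++ [cur ++ [j]]) nl) []]
  simp only [PySem.List.foldl_append_singleton_eq_map]
  rw [PySem.List.foldl_append_eq_flatMap]
  simp

lemma get_tuples_eq (max_val list_len : Int) :
    get_tuples max_val list_len = get_tuples_alt max_val list_len := by
  rw [get_tuples]
  split_ifs with h
  · have ih := get_tuples_eq max_val (list_len - 1)
    rw [ih, tuple_helper_eq_step]
    unfold get_tuples_alt
    have h2 : list_len - 1 = (list_len - 1 - 1) + 1 := by ring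
    rw [h2, PySem.List.pyRange_one_succ_right (by omega : (0:Int) ≤ list_len - 1 - 1),
        List.foldl_append]
    have h3 : list_len - 1 - 1 + 1 - 1 = list_len - 1 - 1 := by ring
    rw [h3]
    rfl
  · unfold get_tuples_alt
    rw [PySem.List.pyRange_one_eq_nil (a := 0) (b := list_len - 1) (by omega)]
    simp only [List.foldl_nil, PySem.List.foldl_append_singleton_eq_map, List.nil_append]
termination_by list_len.toNat
decreasing_by omega

-- ===== VERDICT (by name: the statement is the Claim_ definition above) =====
theorem get_tuples_spec : Claim_equal_get_tuples := by
  intro max_val list_len _ _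
  exact get_tuples_eq max_val list_len
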